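-- pv_equiv track=rewrite | github.com/umass-aisec/Terrarium | envs/dcops/CoLLAB/SmartGrid/prompt_maker.py | _contiguous_runs
-- ===== SOURCE A (Python) =====
-- from typing import Dict, List, Tuple, Optional, Any
-- from typing import Dict, List, Tuple, Optional, Any
-- from typing import Dict, List, Optional, Any
-- from typing import Dict, List, Optional, Any
--
-- def _contiguous_runs(sorted_vals: List[int]) -> List[Tuple[int, int]]:
--     runs: List[Tuple[int, int]] = []
--     if not sorted_vals:
--         return runs
--     start = prev = sorted_vals[0]
--     for v in sorted_vals[1:]:
--         if v == prev + 1: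
--             prev = v
--             continue
--         runs.append((start, prev))
--         start = prev = v
--     runs.append((start, prev))
--     return runs
-- ===== SOURCE B (Python) =====
-- from itertools import groupby
-- from typing import List, Tuple
--
-- def _contiguous_runs(sorted_vals: List[int]) -> List[Tuple[int, int]]:
--     runs: List[Tuple[int, int]] = []
--     for _, grp in groupby(enumerate(sorted_vals), key=lambda p: p[1] - p[0]):
--         g = list(grp)
--         runs.append((g[0][1], g[-1][1]))
--     return runs
-- ===== Notes on version B (the rewrite author's own statement) =====
-- stated objective: idiomatic
-- what changed: Replaces the explicit start/prev state-machine loop with a single itertools.groupby pass over enumerate(sorted_vals) keyed by v - i, whose constant-key groups are exactly the maximal consecutive runs.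
import Mathlib
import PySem

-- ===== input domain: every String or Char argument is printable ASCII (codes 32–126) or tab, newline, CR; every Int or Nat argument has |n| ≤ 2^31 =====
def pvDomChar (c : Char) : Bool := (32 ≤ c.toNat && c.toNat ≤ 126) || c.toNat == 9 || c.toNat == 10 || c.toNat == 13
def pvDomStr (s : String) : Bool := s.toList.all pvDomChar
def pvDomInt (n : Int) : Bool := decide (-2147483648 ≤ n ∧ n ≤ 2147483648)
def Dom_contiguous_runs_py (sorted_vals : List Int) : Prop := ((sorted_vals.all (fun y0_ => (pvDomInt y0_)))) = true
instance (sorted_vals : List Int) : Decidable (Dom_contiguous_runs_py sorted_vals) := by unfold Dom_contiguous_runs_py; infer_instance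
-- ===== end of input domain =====

-- B replaces A's explicit start/prev state-machine loop with an itertools.groupby pass
-- over enumerate(sorted_vals) keyed by v - i (idiomatic; same O(n) cost).


-- ===== PORT A =====
-- A: state machine over the tail with (runs, start, prev), final run appended after the loop.
def contiguous_runs_py (sorted_vals : List Int) : List (Int × Int) :=
  match sorted_vals with
  | [] => []
  | v0 :: rest =>
    let st := rest.foldl
      (fun (acc : List (Int × Int) × Int × Int) v =>
        if v = acc.2.2 + 1 then (acc.1, acc.2.1, v)
        else (acc.1 ++ [(acc.2.1, acc.2.2)], v, v))
      ([], v0, v0)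
    st.1 ++ [(st.2.1, st.2.2)]

-- ===== PORT B =====
-- enumerate(sorted_vals) starting at index i (hand port of Python's enumerate; exact)
def pvEnumFrom : Int → List Int → List (Int × Int)
  | _, [] => []
  | i, v :: vs => (i, v) :: pvEnumFrom (i + 1) vs

-- itertools.groupby with key p ↦ p.2 - p.1 (hand port; exact: groups maximal
-- consecutive stretches with equal key, groups kept in order, elements in order)
def pvGroupBy : Int → List (Int × Int) → List (Int × Int) → List (List (Int × Int))
  | _, cur, [] => [cur]
  | k, cur, x :: xs =>
    if x.2 - x.1 = k then pvGroupBy k (cur ++ [x]) xs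
    else cur :: pvGroupBy (x.2 - x.1) [x] xs

def contiguous_runs_py_alt (sorted_vals : List Int) : List (Int × Int) :=
  match pvEnumFrom 0 sorted_vals with
  | [] => []
  | x :: xs =>
    (pvGroupBy (x.2 - x.1) [x] xs).map
      (fun g => ((g.headD (0, 0)).2, (g.getLastD (0, 0)).2))

-- ===== PRECONDITION & SPEC =====
def Spec_contiguous_runs_py (sorted_vals : List Int) (out : List (Int × Int)) : Prop := out = contiguous_runs_py_alt sorted_vals
instance (sorted_vals : List Int) (out : List (Int × Int)) : Decidable (Spec_contiguous_runs_py sorted_vals out) := by unfold Spec_contiguous_runs_py; infer_instance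

-- ===== CLAIM (what is proved, stated in full; the proofs are below) =====
def Claim_equal_contiguous_runs_py : Prop := ∀ (sorted_vals : List Int), Dom_contiguous_runs_py sorted_vals → Spec_contiguous_runs_py sorted_vals (contiguous_runs_py sorted_vals)

-- ===== LEMMAS AND PROOFS =====

-- reference recursion both ports are reduced to
def runsSpec (s prev : Int) : List Int → List (Int × Int)
  | [] => [(s, prev)]
  | v :: vs => if v = prev + 1 then runsSpec s v vs else (s, prev) :: runsSpec v v vs

theorem foldA_eq (vs : List Int) : ∀ (runs : List (Int × Int)) (s prev : Int),
    (let st := vs.foldl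
        (fun (acc : List (Int × Int) × Int × Int) v =>
          if v = acc.2.2 + 1 then (acc.1, acc.2.1, v)
          else (acc.1 ++ [(acc.2.1, acc.2.2)], v, v))
        (runs, s, prev)
     ; st.1 ++ [(st.2.1, st.2.2)]) = runs ++ runsSpec s prev vs := by
  induction vs with
  | nil => intro runs s prev; simp [runsSpec]
  | cons v vs ih =>
    intro runs s prev
    simp only [List.foldl_cons, runsSpec]
    by_cases h : v = prev + 1
    · simp [h, ih]
    · simp [h, ih, List.append_assoc]

theorem gb_runs (vs : List Int) : ∀ (i s prev : Int) (cur : List (Int × Int)),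
    cur ≠ [] → (cur.headD (0, 0)).2 = s → (cur.getLastD (0, 0)).2 = prev →
    (pvGroupBy (prev - i) cur (pvEnumFrom (i + 1) vs)).map
        (fun g => ((g.headD (0, 0)).2, (g.getLastD (0, 0)).2))
      = runsSpec s prev vs := by
  induction vs with
  | nil =>
    intro i s prev cur hne hh hl
    simp only [pvEnumFrom, pvGroupBy, runsSpec, List.map_cons, List.map_nil]
    rw [hh, hl]
  | cons v vs ih =>
    intro i s prev cur hne hh hl
    simp only [pvEnumFrom, pvGroupBy, runsSpec]
    by_cases h : v = prev + 1
    · have hk : v - (i + 1) = prev - i := by omega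
      simp only [hk, if_pos h]
      have hk2 : prev - i = v - (i + 1) := by omega
      rw [hk2]
      apply ih (i + 1) s v (cur ++ [(i + 1, v)]) (by simp)
      · cases cur with
        | nil => exact absurd rfl hne
        | cons a t => simpa using hh
      · simp
    · have hk : ¬ (v - (i + 1) = prev - i) := by omega
      simp only [if_neg hk, if_neg h, List.map_cons, hh, hl]
      congr 1
      have := ih (i + 1) v v [(i + 1, v)] (by simp) (by simp) (by simp)
      simpa using this

-- ===== VERDICT (by name: the statement is the Claim_ definition above) =====
theorem contiguous_runs_py_spec : Claim_equal_contiguous_runs_py := by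
  intro sorted_vals _
  unfold Spec_contiguous_runs_py contiguous_runs_py contiguous_runs_py_alt
  cases sorted_vals with
  | nil => rfl
  | cons v rest =>
    have h := gb_runs rest 0 v v [(0, v)] (by simp) rfl rfl
    simp only [pvEnumFrom]
    rw [foldA_eq]
    simp only [List.nil_append]
    rw [← h]
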